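-- pv_equiv track=rewrite | github.com/ddugovic/advent-of-code-dan | aoc_dan/aoc2021/q03.py | mode
-- ===== SOURCE A (Python) =====
-- def mode(lines):
--     """Determine mode of lines"""
--     count = [0] * len(lines[0])
--     for line in lines:
--         for index, bit in enumerate(line):
--             if bit == '0':
--                 count[index] -= 1
--             else:
--                 count[index] += 1
--     modes = [0] * len(lines[0])
--     for index, bit in enumerate(count):
--         if count[index] >= 0:
--             modes[index] = 1
--     return modes
-- ===== SOURCE B (Python) =====
-- def mode(lines):
--     """Determine mode of lines"""
--     width = len(lines[0])
--     result = []
--     for i in range(width):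
--         col = [line[i] for line in lines if i < len(line)]
--         ones = sum(1 for c in col if c != '0')
--         result.append(1 if 2 * ones >= len(col) else 0)
--     return result
-- ===== Notes on version B (the rewrite author's own statement) =====
-- stated objective: idiomatic
-- what changed: B iterates column by column, counting non-'0' chars per column and comparing 2*ones >= column size, instead of A's signed per-index accumulator over rows followed by a second finalizing pass.
import Mathlib
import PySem

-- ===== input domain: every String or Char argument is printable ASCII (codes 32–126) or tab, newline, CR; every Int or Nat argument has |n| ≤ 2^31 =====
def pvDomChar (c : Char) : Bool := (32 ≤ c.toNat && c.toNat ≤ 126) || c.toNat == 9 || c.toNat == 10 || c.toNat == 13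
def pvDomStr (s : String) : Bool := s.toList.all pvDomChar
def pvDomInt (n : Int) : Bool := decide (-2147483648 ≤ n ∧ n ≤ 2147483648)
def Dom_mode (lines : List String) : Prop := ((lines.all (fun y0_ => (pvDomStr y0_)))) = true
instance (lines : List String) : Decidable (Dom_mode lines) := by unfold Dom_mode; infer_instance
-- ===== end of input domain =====

-- B computes each column's mode directly (count of non-'0' chars vs column size) instead of
-- A's signed accumulator over rows plus a second finalizing pass; same return value on Pre_.

-- ===== PORT A =====
-- inner loop: for index, bit in enumerate(line)
def modeInner (c : List Int) (k : Nat) (cs : List Char) : List Int :=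
  match cs with
  | [] => c
  | b :: rest =>
      modeInner (if b = '0' then c.set k (c.getD k 0 - 1) else c.set k (c.getD k 0 + 1)) (k + 1) rest

-- second loop: for index, bit in enumerate(count): if count[index] >= 0: modes[index] = 1
def modeFinal (m : List Int) (k : Nat) (cnt : List Int) : List Int :=
  match cnt with
  | [] => m
  | v :: rest => modeFinal (if v ≥ 0 then m.set k 1 else m) (k + 1) rest

def mode (lines : List String) : List Int :=
  let width := (lines.headD "").toList.length  -- len(lines[0]); Pre_mode excludes the IndexError on []
  let count := lines.foldl (fun c line => modeInner c 0 line.toList) (List.replicate width 0)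
  modeFinal (List.replicate width 0) 0 count

-- ===== PORT B =====
def mode_alt (lines : List String) : List Int :=
  let width := (lines.headD "").toList.length  -- len(lines[0]); raises on [] like A
  (List.range width).map (fun i =>
    let col := (lines.filter (fun l => i < l.toList.length)).map (fun l => l.toList.getD i ' ')
    let ones := (col.filter (fun c => c ≠ '0')).length
    if 2 * (ones : Int) ≥ (col.length : Int) then 1 else 0)

-- ===== PRECONDITION & SPEC =====
-- Pre_ excludes exactly the inputs on which A raises: the empty list (lines[0] → IndexError)
-- and lists containing a line longer than the first (count[index] → IndexError).
def Pre_mode (lines : List String) : Prop :=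
  lines ≠ [] ∧ ∀ l ∈ lines, l.toList.length ≤ (lines.headD "").toList.length
instance (lines : List String) : Decidable (Pre_mode lines) := by unfold Pre_mode; infer_instance
def pvWitness_mode : List String := (["101", "011", "1x0"])

def Spec_mode (lines : List String) (out : List Int) : Prop := out = mode_alt lines
instance (lines : List String) (out : List Int) : Decidable (Spec_mode lines out) := by unfold Spec_mode; infer_instance

-- ===== CLAIM (what is proved, stated in full; the proofs are below) =====
def Claim_equal_mode : Prop := ∀ (lines : List String), Dom_mode lines → Pre_mode lines → Spec_mode lines (mode lines)

-- ===== LEMMAS AND PROOFS =====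
def contrib (b : Char) : Int := if b = '0' then -1 else 1

theorem modeInner_length (cs : List Char) (c : List Int) (k : Nat) :
    (modeInner c k cs).length = c.length := by
  induction cs generalizing c k with
  | nil => rfl
  | cons b rest ih => simp only [modeInner]; rw [ih]; split_ifs <;> simp

theorem modeInner_getD (cs : List Char) (acc : List Int) (k i : Nat)
    (h : k + cs.length ≤ acc.length) :
    (modeInner acc k cs)[i]?.getD 0 =
      acc[i]?.getD 0 + (if k ≤ i then ((cs[i - k]?.map contrib).getD 0) else 0) := by
  induction cs generalizing acc k with
  | nil => simp [modeInner]
  | cons b rest ih =>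
    have hk : k < acc.length := by simp at h; omega
    have hstep : modeInner acc k (b :: rest) =
        modeInner (acc.set k (acc.getD k 0 + contrib b)) (k + 1) rest := by
      simp only [modeInner, contrib]
      split_ifs <;> ring_nf
    rw [hstep, ih _ _ (by simp only [List.length_set]; simp at h; omega)]
    by_cases hik : i = k
    · subst hik
      rw [List.getElem?_set_self hk]
      have h1 : ¬ (i + 1 ≤ i) := by omega
      have h2 : (i : Nat) ≤ i := le_refl i
      simp [h1, List.getD_eq_getElem?_getD, List.getElem?_eq_getElem hk]
    · rw [List.getElem?_set_ne (by omega)]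
      by_cases hle : k ≤ i
      · have h1 : k + 1 ≤ i := by omega
        have h2 : (b :: rest)[i - k]? = rest[i - (k + 1)]? := by
          have he : i - k = (i - (k + 1)) + 1 := by omega
          rw [he]; simp
        simp [hle, h1, h2]
      · have h1 : ¬ (k + 1 ≤ i) := by omega
        simp [hle, h1]

theorem outer_length (lines : List String) (c : List Int) :
    (lines.foldl (fun c line => modeInner c 0 line.toList) c).length = c.length := by
  induction lines generalizing c with
  | nil => rfl
  | cons l rest ih => simp only [List.foldl_cons]; rw [ih, modeInner_length]

def colOf (lines : List String) (i : Nat) : List Char :=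
  (lines.filter (fun l => i < l.toList.length)).map (fun l => l.toList.getD i ' ')

def colSum (lines : List String) (i : Nat) : Int := ((colOf lines i).map contrib).sum

theorem colSum_cons (l : String) (rest : List String) (i : Nat) :
    colSum (l :: rest) i =
      (if i < l.toList.length then contrib (l.toList.getD i ' ') else 0) + colSum rest i := by
  simp only [colSum, colOf, List.filter_cons]
  by_cases hi : i < l.toList.length
  · rw [if_pos (by exact decide_eq_true hi), if_pos hi]
    simp
  · rw [if_neg (by simpa using hi), if_neg hi]
    simp

theorem outer_getD (lines : List String) (acc : List Int) (i : Nat)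
    (h : ∀ l ∈ lines, l.toList.length ≤ acc.length) :
    (lines.foldl (fun c line => modeInner c 0 line.toList) acc)[i]?.getD 0 =
      acc[i]?.getD 0 + colSum lines i := by
  induction lines generalizing acc with
  | nil => simp [colSum, colOf]
  | cons l rest ih =>
    have hl : l.toList.length ≤ acc.length := h l (by simp)
    have hrest : ∀ s ∈ rest, s.toList.length ≤ (modeInner acc 0 l.toList).length := by
      intro s hs; rw [modeInner_length]; exact h s (by simp [hs])
    simp only [List.foldl_cons]
    rw [ih _ hrest, modeInner_getD _ _ _ _ (by simpa using hl), colSum_cons]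
    simp only [Nat.sub_zero]
    have hone : ((l.toList[i]?.map contrib).getD 0) =
        (if i < l.toList.length then contrib (l.toList.getD i ' ') else 0) := by
      by_cases hi : i < l.toList.length
      · rw [List.getElem?_eq_getElem hi, if_pos hi, List.getD_eq_getElem _ _ hi]
        rfl
      · rw [List.getElem?_eq_none (by omega), if_neg hi]
        rfl
    rw [if_pos (Nat.zero_le i), hone]
    ring

theorem modeFinal_length (cnt : List Int) (m : List Int) (k : Nat) :
    (modeFinal m k cnt).length = m.length := by
  induction cnt generalizing m k with
  | nil => rfl
  | cons v rest ih => simp only [modeFinal]; rw [ih]; split_ifs <;> simp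

theorem modeFinal_getD (cnt : List Int) (m : List Int) (k i : Nat)
    (h : k + cnt.length ≤ m.length) :
    (modeFinal m k cnt)[i]?.getD 0 =
      (if hk : k ≤ i ∧ i - k < cnt.length then
        (if cnt[i - k]'(hk.2) ≥ 0 then 1 else m[i]?.getD 0) else m[i]?.getD 0) := by
  induction cnt generalizing m k with
  | nil => simp [modeFinal]
  | cons v rest ih =>
    have hk : k < m.length := by simp at h; omega
    simp only [modeFinal]
    rw [ih _ _ (by split_ifs <;> simp at h ⊢ <;> omega)]
    by_cases hik : i = k
    · subst hik
      have h1 : ¬ (i + 1 ≤ i ∧ i - (i + 1) < rest.length) := by omega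
      have h2 : i ≤ i ∧ i - i < (v :: rest).length := ⟨le_refl i, by simp⟩
      rw [dif_neg h1, dif_pos h2]
      have hidx : (v :: rest)[i - i]'(h2.2) = v := by simp
      rw [hidx]
      split_ifs with hv
      · rw [List.getElem?_set_self hk]; simp
      · rfl
    · have hget2 : ((if v ≥ 0 then m.set k 1 else m))[i]?.getD 0 = m[i]?.getD 0 := by
        split_ifs
        · rw [List.getElem?_set_ne (by omega)]
        · rfl
      by_cases hc : k + 1 ≤ i ∧ i - (k + 1) < rest.length
      · have hc' : k ≤ i ∧ i - k < (v :: rest).length := ⟨by omega, by simp; omega⟩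
        rw [dif_pos hc, dif_pos hc', hget2]
        have hidx : (v :: rest)[i - k]'(hc'.2) = rest[i - (k + 1)]'(hc.2) := by
          have hik2 : i - k = (i - (k + 1)) + 1 := by omega
          simp [hik2]
        rw [hidx]
      · have hc' : ¬ (k ≤ i ∧ i - k < (v :: rest).length) := by
          simp only [List.length_cons]; omega
        rw [dif_neg hc, dif_neg hc', hget2]

theorem sum_contrib (zs : List Char) :
    (zs.map contrib).sum = 2 * ((zs.filter (fun c => c ≠ '0')).length : Int) - zs.length := by
  induction zs with
  | nil => simp
  | cons z rest ih =>
    by_cases hz : z = '0' <;> simp [contrib, hz, ih] <;> ring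

theorem mode_eq (lines : List String)
    (hlen : ∀ l ∈ lines, l.toList.length ≤ (lines.headD "").toList.length) :
    mode lines = mode_alt lines := by
  set width := (lines.headD "").toList.length with hw
  set cnt := lines.foldl (fun c line => modeInner c 0 line.toList) (List.replicate width 0)
    with hcntdef
  have hcl : cnt.length = width := by rw [hcntdef, outer_length, List.length_replicate]
  have hmodeA : mode lines = modeFinal (List.replicate width 0) 0 cnt := rfl
  have hlenA : (mode lines).length = width := by
    rw [hmodeA, modeFinal_length, List.length_replicate]
  have hlenB : (mode_alt lines).length = width := by
    simp only [mode_alt, List.length_map, List.length_range]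
    rfl
  apply List.ext_getElem (by rw [hlenA, hlenB])
  intro i hiA hiB
  have hi : i < width := by rwa [hlenA] at hiA
  have hcnt : cnt[i]?.getD 0 = colSum lines i := by
    rw [hcntdef, outer_getD lines _ i (by intro l hl; rw [List.length_replicate]; exact hlen l hl)]
    simp [hi]
  have hA : (mode lines)[i]?.getD 0 = (if colSum lines i ≥ 0 then 1 else 0) := by
    rw [hmodeA, modeFinal_getD _ _ _ _ (by rw [List.length_replicate, hcl]; omega)]
    have hk : 0 ≤ i ∧ i - 0 < cnt.length := ⟨Nat.zero_le _, by rw [hcl]; simpa using hi⟩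
    rw [dif_pos hk]
    have hv : cnt[i - 0]'(hk.2) = colSum lines i := by
      rw [← hcnt]
      simp only [Nat.sub_zero]
      rw [List.getElem?_eq_getElem (by simpa using hk.2)]
      rfl
    rw [hv]
    split_ifs
    · rfl
    · simp [hi]
  have hB : (mode_alt lines)[i]'hiB =
      (if 2 * (((colOf lines i).filter (fun c => c ≠ '0')).length : Int) ≥
        ((colOf lines i).length : Int) then 1 else 0) := by
    simp only [mode_alt, colOf, List.getElem_map, List.getElem_range]
    rfl
  have hAi : (mode lines)[i]'hiA = (mode lines)[i]?.getD 0 := by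
    rw [List.getElem?_eq_getElem hiA]; rfl
  rw [hAi, hA, hB]
  have hcs : colSum lines i =
      2 * (((colOf lines i).filter (fun c => c ≠ '0')).length : Int) -
        ((colOf lines i).length : Int) := by
    rw [colSum, sum_contrib]
  rw [hcs]
  split_ifs with h1 h2 h2 <;> first | rfl | omega

-- ===== VERDICT (by name: the statement is the Claim_ definition above) =====
theorem mode_spec : Claim_equal_mode := by
  intro lines _ hpre
  unfold Spec_mode
  exact mode_eq lines hpre.2
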